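-- pv_equiv track=rewrite | github.com/UGE-L1-MI-2025-2026/probl-me-3-visualisation-de-donn-es-g-ographiques-117-guy-emmanuel-lucile | data_process.py | compter_lieux_par_type
-- ===== SOURCE A (Python) =====
-- def compter_lieux_par_type(liste_lieux):
--     """
--     Compte le nombre de lieux par couleur (type)
--     Retourne un dictionnaire {couleur: nombre}
--     """
--     compteur = {}
--     for lieu in liste_lieux:
--         couleur = lieu['couleur']
--         if couleur in compteur:
--             compteur[couleur] = compteur[couleur] + 1
--         else:
--             compteur[couleur] = 1
--
--     return compteur
-- ===== SOURCE B (Python) =====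
-- def compter_lieux_par_type(liste_lieux):
--     """
--     Compte le nombre de lieux par couleur (type)
--     Retourne un dictionnaire {couleur: nombre}
--     """
--     couleurs = list(dict.fromkeys(lieu['couleur'] for lieu in liste_lieux))
--     return {c: sum(1 for lieu in liste_lieux if lieu['couleur'] == c) for c in couleurs}
-- ===== Notes on version B (the rewrite author's own statement) =====
-- stated objective: alternative
-- what changed: Replaces the single accumulating dict-counter pass with a distinct-colours-then-count-per-colour strategy: first an ordered dedup of the colours, then one counting scan of the list per distinct colour.
import Mathlib
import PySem

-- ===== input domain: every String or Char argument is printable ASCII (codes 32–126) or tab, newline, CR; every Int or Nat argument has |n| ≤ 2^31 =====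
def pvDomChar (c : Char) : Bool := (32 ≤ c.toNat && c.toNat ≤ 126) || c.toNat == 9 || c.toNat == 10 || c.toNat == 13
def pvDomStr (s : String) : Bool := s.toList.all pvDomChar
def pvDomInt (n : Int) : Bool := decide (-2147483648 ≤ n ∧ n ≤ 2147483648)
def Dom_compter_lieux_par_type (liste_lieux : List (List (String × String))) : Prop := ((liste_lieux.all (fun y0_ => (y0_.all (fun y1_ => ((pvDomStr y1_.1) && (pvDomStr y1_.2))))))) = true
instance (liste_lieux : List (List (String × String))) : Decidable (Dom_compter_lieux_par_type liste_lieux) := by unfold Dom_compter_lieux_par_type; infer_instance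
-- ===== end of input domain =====

-- B replaces A's single accumulating dict-counter pass by an ordered dedup of the
-- colours followed by one counting scan per distinct colour (objective: alternative).

-- lieu['couleur'] (both Pythons); total via getD "", exact on Pre_ (key present)
def pvCouleur (lieu : List (String × String)) : String :=
  ((PySem.Dict.mk lieu).get? "couleur").getD ""

-- ===== PORT A =====
def compter_lieux_par_type (liste_lieux : List (List (String × String))) : List (String × Int) :=
  (liste_lieux.foldl (fun compteur lieu =>
      let couleur := pvCouleur lieu
      if compteur.contains couleur then
        compteur.insert couleur (compteur.getD couleur 0 + 1)
      else
        compteur.insert couleur 1)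
    PySem.Dict.empty).items

-- ===== PORT B =====
def compter_lieux_par_type_alt (liste_lieux : List (List (String × String))) : List (String × Int) :=
  let couleurs := PySem.List.dedup (liste_lieux.map (fun lieu => pvCouleur lieu))
  couleurs.map (fun c =>
    (c, (liste_lieux.map (fun lieu => if pvCouleur lieu == c then (1 : Int) else 0)).sum))

-- ===== PRECONDITION & SPEC =====
-- Pre_ excludes exactly the inputs on which Python A raises KeyError: a lieu without the key 'couleur'.
def Pre_compter_lieux_par_type (liste_lieux : List (List (String × String))) : Prop :=
  (liste_lieux.all (fun lieu => (PySem.Dict.mk lieu).contains "couleur")) = true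
instance (liste_lieux : List (List (String × String))) : Decidable (Pre_compter_lieux_par_type liste_lieux) := by unfold Pre_compter_lieux_par_type; infer_instance
def pvWitness_compter_lieux_par_type : (List (List (String × String))) :=
  [[("couleur", "rouge")], [("couleur", "bleu"), ("nom", "a")], [("couleur", "rouge")]]
def Spec_compter_lieux_par_type (liste_lieux : List (List (String × String))) (out : List (String × Int)) : Prop := out = compter_lieux_par_type_alt liste_lieux
instance (liste_lieux : List (List (String × String))) (out : List (String × Int)) : Decidable (Spec_compter_lieux_par_type liste_lieux out) := by unfold Spec_compter_lieux_par_type; infer_instance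

-- ===== CLAIM (what is proved, stated in full; the proofs are below) =====
def Claim_equal_compter_lieux_par_type : Prop := ∀ (liste_lieux : List (List (String × String))), Dom_compter_lieux_par_type liste_lieux → Pre_compter_lieux_par_type liste_lieux → Spec_compter_lieux_par_type liste_lieux (compter_lieux_par_type liste_lieux)

-- ===== LEMMAS AND PROOFS =====

-- A's loop body: both branches are the uniform counter step "insert (getD + 1)".
theorem pv_step_eq (d : PySem.Dict String Int) (c : String) :
    (if d.contains c then d.insert c (d.getD c 0 + 1) else d.insert c 1)
      = d.insert c (d.getD c 0 + 1) := by
  by_cases h : d.contains c = true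
  · simp [h]
  · simp only [Bool.not_eq_true] at h
    rw [if_neg (by simp [h]), PySem.Dict.getD_of_not_contains d 0 h]
    norm_num

-- A's fold over lieux is the Counter of the extracted colour list.
theorem pv_foldA (l : List (List (String × String))) (d : PySem.Dict String Int) :
    l.foldl (fun compteur lieu =>
        let couleur := pvCouleur lieu
        if compteur.contains couleur then
          compteur.insert couleur (compteur.getD couleur 0 + 1)
        else
          compteur.insert couleur 1) d
      = (l.map (fun lieu => pvCouleur lieu)).foldl
          (fun d x => d.insert x (d.getD x 0 + 1)) d := by
  induction l generalizing d with
  | nil => rfl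
  | cons h t ih =>
      rw [List.map_cons, List.foldl_cons, List.foldl_cons]
      have hinit : (let couleur := pvCouleur h
          if d.contains couleur then
            d.insert couleur (d.getD couleur 0 + 1)
          else
            d.insert couleur 1)
          = d.insert (pvCouleur h) (d.getD (pvCouleur h) 0 + 1) := pv_step_eq d (pvCouleur h)
      rw [hinit]
      exact ih _

-- ===== VERDICT (by name: the statement is the Claim_ definition above) =====
theorem compter_lieux_par_type_spec : Claim_equal_compter_lieux_par_type := by
  intro l _ _
  unfold Spec_compter_lieux_par_type compter_lieux_par_type compter_lieux_par_type_alt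
  rw [pv_foldA, PySem.Dict.foldl_insert_getD_add_one_eq_counter, PySem.Dict.items_counter]
  rw [show PySem.Set.ofList (l.map (fun lieu => pvCouleur lieu))
      = PySem.List.dedup (l.map (fun lieu => pvCouleur lieu)) from rfl]
  apply List.map_congr_left
  intro c _
  rw [PySem.List.sum_map_ite_one_zero]
  congr 1
  rw [List.count_eq_countP, List.countP_map]
  rfl
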